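-- pv_equiv track=rewrite | github.com/Lev-Excellenteam-2023/google-autocomplete-team-8 | autoComplete/string_compare.py | del_prefix_suffix_insert
-- ===== SOURCE A (Python) =====
-- def del_prefix_suffix_insert(actions):
--     # indices_to_del = []
--     #
--     # for i, action in enumerate(actions):
--     #
--     #     if action[0] == 'insert':
--     #         indices_to_del.append(i)
--     #     else:
--     #         break
--     # for i, action in zip(range(len(actions) - 1, -1, -1), reversed(actions)):
--     #     if action[0] == 'insert':
--     #         indices_to_del.append(i)
--     #     else:
--     #         break
--     #
--     # clean_actions = tuple(filter(lambda x: x[0] not in indices_to_del, enumerate(actions)))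
--     # clean_actions = tuple([element[1] for element in clean_actions])
--
--     start_index = 0
--     end_index = len(actions)
--
--     # Find the first non-'insert' from the start
--     while start_index < end_index and actions[start_index][0] == 'insert':
--         start_index += 1
--
--     # Find the first non-'insert' from the end
--     while end_index > start_index and actions[end_index - 1][0] == 'insert':
--         end_index -= 1
--
--     clean_actions = actions[start_index:end_index]
--
--     return clean_actions
-- ===== SOURCE B (Python) =====
-- def del_prefix_suffix_insert(actions):
--     idxs = [i for i, action in enumerate(actions) if action[0] != 'insert']
--     if not idxs:
--         return actions[0:0]
--     return actions[idxs[0]:idxs[-1] + 1]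
-- ===== Notes on version B (the rewrite author's own statement) =====
-- stated objective: alternative
-- what changed: Replaced the two early-stopping boundary while-loops with one full enumerate-comprehension collecting all non-'insert' indices, slicing once from the first to the last such index.
import Mathlib
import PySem

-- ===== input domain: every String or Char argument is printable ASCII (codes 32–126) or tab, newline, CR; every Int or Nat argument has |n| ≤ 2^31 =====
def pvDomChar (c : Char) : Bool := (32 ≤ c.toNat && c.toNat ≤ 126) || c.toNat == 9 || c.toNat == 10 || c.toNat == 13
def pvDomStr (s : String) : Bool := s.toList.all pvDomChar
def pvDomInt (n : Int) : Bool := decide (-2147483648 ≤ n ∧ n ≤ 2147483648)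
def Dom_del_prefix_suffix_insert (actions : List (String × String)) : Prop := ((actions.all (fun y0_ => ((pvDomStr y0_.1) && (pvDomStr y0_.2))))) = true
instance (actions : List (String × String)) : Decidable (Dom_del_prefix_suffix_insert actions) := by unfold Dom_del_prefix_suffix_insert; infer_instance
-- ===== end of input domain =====

-- B replaces A's two early-stopping boundary while-loops by one full enumerate-comprehension of
-- all non-'insert' indices followed by a single slice (alternative decomposition, same cost).

-- ===== PORT A =====
-- first while loop: advance start_index while actions[start_index][0] == 'insert'
def pvAStart (actions : List (String × String)) (e : Nat) (i : Nat) : Nat :=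
  if i < e ∧ (actions.getD i ("", "")).1 = "insert" then pvAStart actions e (i + 1) else i
termination_by e - i
decreasing_by omega

-- second while loop: retreat end_index while actions[end_index - 1][0] == 'insert'
def pvAEnd (actions : List (String × String)) (s : Nat) (e : Nat) : Nat :=
  if s < e ∧ (actions.getD (e - 1) ("", "")).1 = "insert" then pvAEnd actions s (e - 1) else e
termination_by e
decreasing_by omega

def del_prefix_suffix_insert (actions : List (String × String)) : List (String × String) :=
  let start_index := pvAStart actions actions.length 0
  let end_index := pvAEnd actions start_index actions.length
  PySem.List.slice actions (some (start_index : Int)) (some (end_index : Int))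

-- ===== PORT B =====
def del_prefix_suffix_insert_alt (actions : List (String × String)) : List (String × String) :=
  let idxs := ((PySem.List.enumerate actions 0).filter (fun p => p.2.1 != "insert")).map (·.1)
  match idxs with
  | [] => PySem.List.slice actions (some 0) (some 0)
  | i :: rest =>
      PySem.List.slice actions (some i) (some ((i :: rest).getLast (List.cons_ne_nil i rest) + 1))

-- ===== PRECONDITION & SPEC =====
def Spec_del_prefix_suffix_insert (actions : List (String × String)) (out : List (String × String)) : Prop := out = del_prefix_suffix_insert_alt actions
instance (actions : List (String × String)) (out : List (String × String)) : Decidable (Spec_del_prefix_suffix_insert actions out) := by unfold Spec_del_prefix_suffix_insert; infer_instance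

-- ===== CLAIM (what is proved, stated in full; the proofs are below) =====
def Claim_equal_del_prefix_suffix_insert : Prop := ∀ (actions : List (String × String)), Dom_del_prefix_suffix_insert actions → Spec_del_prefix_suffix_insert actions (del_prefix_suffix_insert actions)

-- ===== LEMMAS AND PROOFS =====

-- proof-side predicate: the pair's action name is 'insert'
def pvIns (a : String × String) : Bool := a.1 == "insert"

-- proof-side list of the indices of the non-'insert' elements, in order
def pvNidx : List (String × String) → List Nat
  | [] => []
  | a :: t => if pvIns a then (pvNidx t).map (· + 1) else 0 :: (pvNidx t).map (· + 1)

theorem pvAStart_eq (actions : List (String × String)) (i : Nat) (h : i ≤ actions.length) :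
    pvAStart actions actions.length i = i + ((actions.drop i).takeWhile pvIns).length := by
  unfold pvAStart
  split
  · rename_i hc
    obtain ⟨hlt, hins⟩ := hc
    have hdrop : actions.drop i = actions[i] :: actions.drop (i + 1) :=
      List.drop_eq_getElem_cons hlt
    have hget : actions.getD i ("", "") = actions[i] := List.getD_eq_getElem _ _ hlt
    have hp : pvIns actions[i] = true := by
      rw [← hget]; simp [pvIns]; exact hins
    rw [pvAStart_eq actions (i + 1) (by omega), hdrop, List.takeWhile_cons, hp]
    simp; omega
  · rename_i hc
    by_cases hlt : i < actions.length
    · have hdrop : actions.drop i = actions[i] :: actions.drop (i + 1) :=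
        List.drop_eq_getElem_cons hlt
      have hins : ¬ (actions.getD i ("", "")).1 = "insert" := by tauto
      have hget : actions.getD i ("", "") = actions[i] := List.getD_eq_getElem _ _ hlt
      have hp : pvIns actions[i] = false := by
        rw [← hget]; simp [pvIns]; simpa using hins
      rw [hdrop, List.takeWhile_cons, hp]
      simp
    · have : i = actions.length := by omega
      subst this
      simp
termination_by actions.length - i
decreasing_by omega

theorem pvAEnd_eq (actions : List (String × String)) (s e : Nat) (hse : s ≤ e)
    (he : e ≤ actions.length) :
    pvAEnd actions s e = e - min (e - s) (((actions.take e).reverse.takeWhile pvIns).length) := by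
  unfold pvAEnd
  split
  · rename_i hc
    obtain ⟨hlt, hins⟩ := hc
    have he1 : e - 1 < actions.length := by omega
    have htake : actions.take e = actions.take (e - 1) ++ [actions[e - 1]] := by
      have : e = (e - 1) + 1 := by omega
      conv_lhs => rw [this]
      rw [List.take_add_one]
      simp [List.getElem?_eq_getElem he1]
    have hget : actions.getD (e - 1) ("", "") = actions[e - 1] :=
      List.getD_eq_getElem _ _ he1
    have hp : pvIns actions[e - 1] = true := by rw [← hget]; simp [pvIns]; exact hins
    rw [pvAEnd_eq actions s (e - 1) (by omega) (by omega), htake]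
    rw [List.reverse_append]
    simp [hp]
    omega
  · rename_i hc
    by_cases hlt : s < e
    · have he1 : e - 1 < actions.length := by omega
      have htake : actions.take e = actions.take (e - 1) ++ [actions[e - 1]] := by
        have : e = (e - 1) + 1 := by omega
        conv_lhs => rw [this]
        rw [List.take_add_one]
        simp [List.getElem?_eq_getElem he1]
      have hins : ¬ (actions.getD (e - 1) ("", "")).1 = "insert" := by tauto
      have hget : actions.getD (e - 1) ("", "") = actions[e - 1] :=
        List.getD_eq_getElem _ _ he1
      have hp : pvIns actions[e - 1] = false := by
        rw [← hget]; simp [pvIns]; simpa using hins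
      rw [htake, List.reverse_append]
      simp [hp]
    · have : s = e := by omega
      subst this
      simp
termination_by e
decreasing_by omega

theorem pvNidx_cons (a : String × String) (t : List (String × String)) :
    pvNidx (a :: t) = if pvIns a then (pvNidx t).map (· + 1) else 0 :: (pvNidx t).map (· + 1) :=
  rfl

-- B's index comprehension computes pvNidx (shifted by the enumerate offset)
theorem pvIdxs_eq (l : List (String × String)) (s : Int) :
    ((PySem.List.enumerate l s).filter (fun p => p.2.1 != "insert")).map (·.1)
      = (pvNidx l).map (fun k : Nat => s + (k : Int)) := by
  induction l generalizing s with
  | nil => simp [PySem.List.enumerate, pvNidx]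
  | cons a t ih =>
    rw [PySem.List.enumerate_cons, List.filter_cons]
    by_cases hp : pvIns a
    · have hb : (a.1 != "insert") = false := by simpa [pvIns] using hp
      simp only [hb, Bool.false_eq_true, if_false]
      rw [ih, pvNidx_cons, if_pos hp, List.map_map]
      apply List.map_congr_left
      intro k _
      simp only [Function.comp_apply]
      push_cast; ring
    · have hb : (a.1 != "insert") = true := by simpa [pvIns] using hp
      simp only [hb, if_true, List.map_cons]
      rw [ih, pvNidx_cons, if_neg hp, List.map_cons, List.map_map]
      congr 1
      · simp
      · apply List.map_congr_left
        intro k _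
        simp only [Function.comp_apply]
        push_cast; ring

theorem pvNidx_head (l : List (String × String)) (h : pvNidx l ≠ []) :
    (pvNidx l).head h = (l.takeWhile pvIns).length := by
  induction l with
  | nil => simp [pvNidx] at h
  | cons a t ih =>
    by_cases hp : pvIns a
    · have hne : pvNidx t ≠ [] := by
        intro he; apply h; simp [pvNidx, hp, he]
      have : pvNidx (a :: t) = (pvNidx t).map (· + 1) := by simp [pvNidx, hp]
      rw [List.takeWhile_cons, hp]
      simp only [this] at h ⊢
      rw [List.head_map]
      simp [ih hne]
    · have hpf : pvIns a = false := by simpa using hp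
      simp [pvNidx, hpf]

theorem pvNidx_append (u v : List (String × String)) :
    pvNidx (u ++ v) = pvNidx u ++ (pvNidx v).map (· + u.length) := by
  induction u with
  | nil => simp [pvNidx]
  | cons a t ih =>
    by_cases hp : pvIns a <;>
      simp [pvNidx, hp, ih, List.map_map]

theorem pvNidx_getLast (l : List (String × String)) (h : pvNidx l ≠ []) :
    (pvNidx l).getLast h + 1 + (l.reverse.takeWhile pvIns).length = l.length := by
  induction l using List.reverseRecOn with
  | nil => exact absurd rfl h
  | append_singleton t a ih =>
    by_cases hp : pvIns a
    · have hsing : pvNidx [a] = [] := by simp [pvNidx, hp]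
      have heq : pvNidx (t ++ [a]) = pvNidx t := by simp [pvNidx_append, hsing]
      have hne : pvNidx t ≠ [] := by rw [← heq]; exact h
      have hgl : (pvNidx (t ++ [a])).getLast h = (pvNidx t).getLast hne :=
        List.getLast_congr h hne heq
      rw [hgl]
      rw [List.reverse_append]
      simp only [List.reverse_singleton, List.singleton_append, List.takeWhile_cons, hp, if_true,
        List.length_cons, List.length_append]
      have := ih hne
      have hlen : (t ++ [a]).length = t.length + 1 := by simp
      simp only [List.length_nil]
      omega
    · have hpf : pvIns a = false := by simpa using hp
      have hsing : pvNidx [a] = [0] := by simp [pvNidx, hpf]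
      have heq : pvNidx (t ++ [a]) = pvNidx t ++ [t.length] := by
        simp [pvNidx_append, hsing]
      have hgl : (pvNidx (t ++ [a])).getLast h = t.length := by
        rw [List.getLast_congr h (by simp) heq, List.getLast_append_singleton]
      rw [hgl, List.reverse_append]
      simp [hpf]

theorem pvNidx_head_le_getLast (l : List (String × String)) (h : pvNidx l ≠ []) :
    (pvNidx l).head h ≤ (pvNidx l).getLast h := by
  induction l with
  | nil => simp [pvNidx] at h
  | cons a t ih =>
    by_cases hp : pvIns a
    · have hne : pvNidx t ≠ [] := by
        intro he; apply h; simp [pvNidx, hp, he]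
      have heq : pvNidx (a :: t) = (pvNidx t).map (· + 1) := by simp [pvNidx, hp]
      have h1 : (pvNidx (a :: t)).head h = (pvNidx t).head hne + 1 := by
        simp only [heq] at h ⊢; rw [List.head_map]
      have h2 : (pvNidx (a :: t)).getLast h = (pvNidx t).getLast hne + 1 := by
        simp only [heq] at h ⊢; rw [List.getLast_map]
      rw [h1, h2]
      have := ih hne
      omega
    · have hpf : pvIns a = false := by simpa using hp
      have heq : pvNidx (a :: t) = 0 :: (pvNidx t).map (· + 1) := by simp [pvNidx, hpf]
      simp only [heq, List.head_cons]
      omega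

theorem pvNidx_nil_takeWhile (l : List (String × String)) (h : pvNidx l = []) :
    (l.takeWhile pvIns).length = l.length := by
  induction l with
  | nil => simp
  | cons a t ih =>
    by_cases hp : pvIns a
    · have : pvNidx t = [] := by
        have := h
        simp [pvNidx, hp] at this
        exact this
      rw [List.takeWhile_cons, hp]
      simp [ih this]
    · have hpf : pvIns a = false := by simpa using hp
      simp [pvNidx, hpf] at h

-- ===== VERDICT (by name: the statement is the Claim_ definition above) =====
theorem del_prefix_suffix_insert_spec : Claim_equal_del_prefix_suffix_insert := by
  intro actions _
  unfold Spec_del_prefix_suffix_insert del_prefix_suffix_insert del_prefix_suffix_insert_alt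
  simp only []
  have hidxs := pvIdxs_eq actions 0
  have hstart := pvAStart_eq actions 0 (by omega)
  simp only [List.drop_zero, Nat.zero_add] at hstart
  have htwle : (actions.takeWhile pvIns).length ≤ actions.length :=
    (List.takeWhile_sublist pvIns).length_le
  by_cases hnil : pvNidx actions = []
  · -- all elements are 'insert' (or the list is empty): both sides return the empty slice
    have htw := pvNidx_nil_takeWhile actions hnil
    have hend : pvAEnd actions (pvAStart actions actions.length 0) actions.length
        = actions.length := by
      rw [hstart, htw, pvAEnd_eq actions _ _ (le_refl _) (le_refl _)]
      simp
    rw [hend, hstart, htw, hidxs, hnil]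
    simp [pysem]
  · obtain ⟨k0, rest, hcons⟩ := List.exists_cons_of_ne_nil hnil
    have hhead := pvNidx_head actions hnil
    have hlast := pvNidx_getLast actions hnil
    have hle := pvNidx_head_le_getLast actions hnil
    set gl := (pvNidx actions).getLast hnil with hgl
    have hheadk : k0 = (actions.takeWhile pvIns).length := by
      rw [← hhead]; simp [hcons]
    -- A's end index equals gl + 1
    have hend : pvAEnd actions (pvAStart actions actions.length 0) actions.length
        = gl + 1 := by
      rw [hstart, pvAEnd_eq actions _ _ htwle (le_refl _)]
      rw [List.take_length]
      have hh : (pvNidx actions).head hnil = (actions.takeWhile pvIns).length := hhead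
      omega
    rw [hend, hstart, hidxs, hcons]
    simp only [List.map_cons]
    have hlastmap : (((0 : Int) + (k0 : Int)) :: (rest.map (fun k : Nat => (0 : Int) + (k : Int)))).getLast
        (List.cons_ne_nil _ _) = (0 : Int) + (gl : Int) := by
      have hmapeq : ((0 : Int) + (k0 : Int)) :: (rest.map (fun k : Nat => (0 : Int) + (k : Int)))
          = (k0 :: rest).map (fun k : Nat => (0 : Int) + (k : Int)) := by
        rw [List.map_cons]
      rw [List.getLast_congr _ (by simp) hmapeq, List.getLast_map]
      congr 1
      rw [hgl]
      exact congrArg _ (List.getLast_congr hnil (List.cons_ne_nil _ _) hcons).symm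
    rw [hlastmap]
    have h1 : ((0 : Int) + (k0 : Int)) = ((k0 : Nat) : Int) := by omega
    have h2 : ((0 : Int) + (gl : Int) + 1) = (((gl + 1 : Nat)) : Int) := by omega
    rw [h1, h2, hheadk]
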